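-- pv_equiv track=rewrite | github.com/AaronBrs/ProjetLabyrinthePython | versionClassique/carte.py | coderMurs
-- ===== SOURCE A (Python) =====
-- def murNord(c):
--     """
--     retourne un booléen indiquant si la carte possède un mur au nord
--     paramètre: c une carte
--     """
--     return c[0]
--
-- def murSud(c):
--     """
--     retourne un booléen indiquant si la carte possède un mur au sud
--     paramètre: c une carte
--     """
--     return c[2]
--
-- def murEst(c):
--     """
--     retourne un booléen indiquant si la carte possède un mur à l'est
--     paramètre: c une carte
--     """
--     return c[1]
--
-- def murOuest(c):
--     """
--     retourne un booléen indiquant si la carte possède un mur à l'ouest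
--     paramètre: c une carte
--     """
--     return c[3]
--
-- def coderMurs(c):
--     """
--     code les murs sous la forme d'un entier dont le codage binaire
--     est de la forme bNbEbSbO où bN, bE, bS et bO valent
--        soit 0 s'il n'y a pas de mur dans dans la direction correspondante
--        soit 1 s'il y a un mur dans la direction correspondante
--     bN est le chiffre des unité, BE des dizaine, etc...
--     le code obtenu permet d'obtenir l'indice du caractère semi-graphique
--     correspondant à la carte dans la liste listeCartes au début de ce fichier
--     paramètre c une carte
--     retourne un entier indice du caractère semi-graphique de la carte
--     """
--     #Codage de la carte
--     code = 0
--     if murNord(c):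
--         code += 1
--     if murEst(c):
--         code += 10
--     if murSud(c):
--         code += 100
--     if murOuest(c):
--         code += 1000
--     #Vérifier l'utilité de cette étape
--     i=0
--     fini = False
--     while i <= code and not fini:
--         if code == i:
--             fini = True
--             res=i
--         i+=1
--     ##############
--     if res == 0:
--         indice = 0
--     if res == 1:
--         indice = 1
--     if res == 10:
--         indice = 2
--     if res == 11:
--         indice = 3
--     if res == 100:
--         indice = 4
--     if res == 101:
--         indice = 5
--     if res == 110:
--         indice = 6
--     if res == 111:
--         indice = 7
--     if res == 1000:
--         indice = 8
--     if res == 1001: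
--         indice = 9
--     if res == 1010:
--         indice = 10
--     if res == 1011:
--         indice = 11
--     if res == 1100:
--         indice = 12
--     if res == 1101:
--         indice = 13
--     if res == 1110:
--         indice = 14
--     if res == 1111:
--         indice = 15
--     return indice
-- ===== SOURCE B (Python) =====
-- def coderMurs(c):
--     return (1 if c[0] else 0) + 2 * (1 if c[1] else 0) + 4 * (1 if c[2] else 0) + 8 * (1 if c[3] else 0)
-- ===== Notes on version B (the rewrite author's own statement) =====
-- stated objective: simpler
-- what changed: Replaced the decimal wall code, the search-loop and the 16-branch lookup chain by a single closed-form weighted sum of the four wall bits.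
import Mathlib
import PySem

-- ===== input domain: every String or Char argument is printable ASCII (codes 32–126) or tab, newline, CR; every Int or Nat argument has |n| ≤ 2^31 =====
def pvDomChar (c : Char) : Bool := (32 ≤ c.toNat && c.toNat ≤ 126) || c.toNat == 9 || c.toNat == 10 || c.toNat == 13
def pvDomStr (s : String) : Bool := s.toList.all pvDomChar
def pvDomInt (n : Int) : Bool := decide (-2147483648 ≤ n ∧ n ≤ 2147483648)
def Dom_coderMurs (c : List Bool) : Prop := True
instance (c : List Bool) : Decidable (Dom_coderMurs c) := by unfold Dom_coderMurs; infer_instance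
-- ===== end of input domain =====

-- B replaces A's decimal code, search loop and 16-branch chain by a closed-form weighted sum (objective: simpler).

-- ===== PORT A =====
-- A's `while i <= code and not fini` search loop, fuel-bounded for totality only
-- (fuel code+1 suffices: the loop body runs at most code+1 times before `fini`).
def coderMursWhile : Nat → Int → Int → Int → Int
  | 0, _, _, res => res
  | fuel + 1, code, i, res =>
    if i ≤ code then
      (if code = i then i else coderMursWhile fuel code (i + 1) res)
    else res

-- the chain of 16 independent `if res == k: indice = ...` statements
def coderMursChain (res : Int) : Int :=
  let indice : Int := 0      -- res = 0 case; Python's chain always fires exactly once for res built by the loop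
  let indice := if res = 1 then 1 else indice
  let indice := if res = 10 then 2 else indice
  let indice := if res = 11 then 3 else indice
  let indice := if res = 100 then 4 else indice
  let indice := if res = 101 then 5 else indice
  let indice := if res = 110 then 6 else indice
  let indice := if res = 111 then 7 else indice
  let indice := if res = 1000 then 8 else indice
  let indice := if res = 1001 then 9 else indice
  let indice := if res = 1010 then 10 else indice
  let indice := if res = 1011 then 11 else indice
  let indice := if res = 1100 then 12 else indice
  let indice := if res = 1101 then 13 else indice
  let indice := if res = 1110 then 14 else indice
  let indice := if res = 1111 then 15 else indice
  indice

def coderMurs (c : List Bool) : Int :=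
  match PySem.List.pyGet? c 0, PySem.List.pyGet? c 1, PySem.List.pyGet? c 2, PySem.List.pyGet? c 3 with
  | some n, some e, some s, some o =>
    let code : Int := (if n then 1 else 0) + (if e then 10 else 0)
                      + (if s then 100 else 0) + (if o then 1000 else 0)
    let res := coderMursWhile (code + 1).toNat code 0 0
    coderMursChain res
  | _, _, _, _ => 0   -- IndexError in Python; excluded by Pre_

-- ===== PORT B =====
def coderMurs_alt (c : List Bool) : Int :=
  match c with
  | n :: e :: s :: o :: _ =>
    (if n then 1 else 0) + 2 * (if e then 1 else 0)
      + 4 * (if s then 1 else 0) + 8 * (if o then 1 else 0)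
  | _ => 0   -- IndexError in Python; excluded by Pre_

-- ===== PRECONDITION & SPEC =====
-- Pre_: A reads c[0]..c[3] and raises IndexError on shorter lists.
def Pre_coderMurs (c : List Bool) : Prop := 4 ≤ c.length
instance (c : List Bool) : Decidable (Pre_coderMurs c) := by unfold Pre_coderMurs; infer_instance
def pvWitness_coderMurs : List Bool := [true, false, true, true]

def Spec_coderMurs (c : List Bool) (out : Int) : Prop := out = coderMurs_alt c
instance (c : List Bool) (out : Int) : Decidable (Spec_coderMurs c out) := by unfold Spec_coderMurs; infer_instance

-- ===== CLAIM (what is proved, stated in full; the proofs are below) =====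
def Claim_equal_coderMurs : Prop := ∀ (c : List Bool), Dom_coderMurs c → Pre_coderMurs c → Spec_coderMurs c (coderMurs c)

-- ===== LEMMAS AND PROOFS =====

-- A's search loop just finds `code` itself.
theorem coderMursWhile_eq (fuel : Nat) (code i res : Int)
    (hi : i ≤ code) (hf : code < i + fuel) :
    coderMursWhile fuel code i res = code := by
  induction fuel generalizing i with
  | zero => omega
  | succ n ih =>
    simp only [coderMursWhile, if_pos hi]
    by_cases h : code = i
    · simp [h]
    · rw [if_neg h, ih (i + 1) (by omega) (by omega)]

-- ===== VERDICT (by name: the statement is the Claim_ definition above) =====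
theorem coderMurs_spec : Claim_equal_coderMurs := by
  intro c _ hpre
  unfold Pre_coderMurs at hpre
  match c, hpre with
  | n :: e :: s :: o :: rest, _ =>
    show coderMurs _ = coderMurs_alt _
    have hget : ∀ b : Bool, ∀ l : List Bool, ∀ k : Nat,
        PySem.List.pyGet? (b :: l) (k : Int) = (b :: l)[k]? := by
      intro b l k; simp [PySem.List.pyGet?_natCast]
    unfold coderMurs coderMurs_alt
    cases n <;> cases e <;> cases s <;> cases o <;>
      · simp only [show ((0:Int)) = ((0:Nat):Int) from rfl,
          show ((1:Int)) = ((1:Nat):Int) from rfl,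
          show ((2:Int)) = ((2:Nat):Int) from rfl,
          show ((3:Int)) = ((3:Nat):Int) from rfl,
          PySem.List.pyGet?_natCast]
        simp only [List.getElem?_cons_zero, List.getElem?_cons_succ]
        norm_num
        rw [coderMursWhile_eq _ _ _ _ (by norm_num) (by norm_num)]
        decide
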